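-- pv_equiv track=rewrite | github.com/DGator86/Yoshi-Trading-System | yoshi-bot/src/crypto_rfp_hso/transitions/durations.py | exit_pairs
-- ===== SOURCE A (Python) =====
-- def run_length_encode(states: list[str]) -> list[tuple[str, int]]:
--     """Run-length encode a state sequence."""
--     if not states:
--         return []
--     out: list[tuple[str, int]] = []
--     cur = states[0]
--     count = 1
--     for s in states[1:]:
--         if s == cur:
--             count += 1
--         else:
--             out.append((cur, count))
--             cur = s
--             count = 1
--     out.append((cur, count))
--     return out
--
-- def exit_pairs(states: list[str]) -> list[tuple[str, str]]:
--     """Return (from_state, to_state) pairs for state exits."""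
--     rle = run_length_encode(states)
--     pairs: list[tuple[str, str]] = []
--     for i in range(len(rle) - 1):
--         s_from, _ = rle[i]
--         s_to, _ = rle[i + 1]
--         if s_from != s_to:
--             pairs.append((s_from, s_to))
--     return pairs
-- ===== SOURCE B (Python) =====
-- def exit_pairs(states: list[str]) -> list[tuple[str, str]]:
--     """Return (from_state, to_state) pairs for state exits."""
--     if not states:
--         return []
--     pairs: list[tuple[str, str]] = []
--     prev = states[0]
--     for s in states[1:]:
--         if s != prev:
--             pairs.append((prev, s))
--             prev = s
--     return pairs
-- ===== Notes on version B (the rewrite author's own statement) =====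
-- stated objective: simpler
-- what changed: Replaced the two-pass run-length-encode-then-scan-adjacent-RLE-entries structure with a single pass over the raw states that keeps only the previous state and emits a pair at each change point.
import Mathlib
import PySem

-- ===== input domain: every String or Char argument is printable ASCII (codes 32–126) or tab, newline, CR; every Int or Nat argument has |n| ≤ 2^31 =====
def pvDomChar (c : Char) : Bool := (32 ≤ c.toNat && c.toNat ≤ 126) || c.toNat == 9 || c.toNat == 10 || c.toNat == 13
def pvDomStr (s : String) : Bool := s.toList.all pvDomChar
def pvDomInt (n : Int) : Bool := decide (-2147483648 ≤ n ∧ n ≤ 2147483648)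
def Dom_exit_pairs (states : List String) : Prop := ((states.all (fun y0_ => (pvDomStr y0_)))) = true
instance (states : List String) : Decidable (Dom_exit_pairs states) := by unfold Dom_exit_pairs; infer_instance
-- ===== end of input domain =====

-- B is a single pass over the raw states keeping only the previous state; A's
-- run-length-encode pass, counts and adjacent-RLE scan are dropped (objective: simpler).

-- ===== PORT A =====
-- run_length_encode: fold over states[1:] with state (out, cur, count)
def run_length_encode (states : List String) : List (String × Int) :=
  match states with
  | [] => []
  | c :: rest =>
    let acc := rest.foldl
      (fun (acc : List (String × Int) × String × Int) s =>
        let (out, cur, count) := acc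
        if s = cur then (out, cur, count + 1) else (out ++ [(cur, count)], s, 1))
      ([], c, 1)
    acc.1 ++ [(acc.2.1, acc.2.2)]

-- the index i of the Python loop is always in range, so rle[i] is ported as getD
def exit_pairs (states : List String) : List (String × String) :=
  let rle := run_length_encode states
  (List.range (rle.length - 1)).foldl
    (fun pairs i =>
      let s_from := (rle.getD i ("", 0)).1
      let s_to := (rle.getD (i + 1) ("", 0)).1
      if s_from ≠ s_to then pairs ++ [(s_from, s_to)] else pairs)
    []

-- ===== PORT B =====
def exit_pairs_alt_go (prev : String) (rest : List String)
    (pairs : List (String × String)) : List (String × String) :=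
  match rest with
  | [] => pairs
  | s :: t =>
    if s ≠ prev then exit_pairs_alt_go s t (pairs ++ [(prev, s)])
    else exit_pairs_alt_go prev t pairs

def exit_pairs_alt (states : List String) : List (String × String) :=
  match states with
  | [] => []
  | p :: rest => exit_pairs_alt_go p rest []

-- ===== PRECONDITION & SPEC =====
def Spec_exit_pairs (states : List String) (out : List (String × String)) : Prop := out = exit_pairs_alt states
instance (states : List String) (out : List (String × String)) : Decidable (Spec_exit_pairs states out) := by unfold Spec_exit_pairs; infer_instance

-- ===== CLAIM (what is proved, stated in full; the proofs are below) =====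
def Claim_equal_exit_pairs : Prop := ∀ (states : List String), Dom_exit_pairs states → Spec_exit_pairs states (exit_pairs states)

-- ===== LEMMAS AND PROOFS =====

-- the list of adjacent change-point pairs of a state sequence
def adjP : List String → List (String × String)
  | [] => []
  | [_] => []
  | a :: b :: t => if a ≠ b then (a, b) :: adjP (b :: t) else adjP (b :: t)

-- consecutive-duplicate removal (the first components of the RLE)
def dedupC : List String → List String
  | [] => []
  | [a] => [a]
  | a :: b :: t => if b = a then dedupC (a :: t) else a :: dedupC (b :: t)

theorem dedupC_cons_head (xs : List String) : ∀ x : String, ∃ ys, dedupC (x :: xs) = x :: ys := by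
  induction xs with
  | nil => intro x; exact ⟨[], by simp [dedupC]⟩
  | cons y ys ih =>
    intro x
    by_cases h : y = x
    · subst h
      obtain ⟨zs, hz⟩ := ih y
      exact ⟨zs, by simpa [dedupC] using hz⟩
    · exact ⟨dedupC (y :: ys), by simp [dedupC, h]⟩

theorem adjP_dedupC : (l : List String) → adjP (dedupC l) = adjP l
  | [] => by simp [dedupC]
  | [a] => by simp [dedupC]
  | a :: b :: t => by
    by_cases h : b = a
    · subst h
      rw [show dedupC (b :: b :: t) = dedupC (b :: t) by simp [dedupC]]
      rw [adjP_dedupC (b :: t)]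
      simp [adjP]
    · rw [show dedupC (a :: b :: t) = a :: dedupC (b :: t) by simp [dedupC, h]]
      obtain ⟨ys, hy⟩ := dedupC_cons_head t b
      rw [hy]
      have h' : a ≠ b := fun e => h e.symm
      rw [show adjP (a :: b :: ys) = (a, b) :: adjP (b :: ys) by simp [adjP, h']]
      rw [← hy, adjP_dedupC (b :: t)]
      simp [adjP, h']

-- the RLE fold's first components are exactly dedupC
theorem rle_fold_map_fst (rest : List String) :
    ∀ (out : List (String × Int)) (cur : String) (count : Int),
      (((rest.foldl
        (fun (acc : List (String × Int) × String × Int) s =>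
          let (o, c, k) := acc
          if s = c then (o, c, k + 1) else (o ++ [(c, k)], s, 1))
        (out, cur, count)).1
        ++ [((rest.foldl
        (fun (acc : List (String × Int) × String × Int) s =>
          let (o, c, k) := acc
          if s = c then (o, c, k + 1) else (o ++ [(c, k)], s, 1))
        (out, cur, count)).2.1,
        (rest.foldl
        (fun (acc : List (String × Int) × String × Int) s =>
          let (o, c, k) := acc
          if s = c then (o, c, k + 1) else (o ++ [(c, k)], s, 1))
        (out, cur, count)).2.2)]).map Prod.fst)
      = out.map Prod.fst ++ dedupC (cur :: rest) := by
  induction rest with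
  | nil => intro out cur count; simp [dedupC]
  | cons s t ih =>
    intro out cur count
    by_cases h : s = cur
    · subst h
      simpa [List.foldl_cons, dedupC] using ih out s (count + 1)
    · have := ih (out ++ [(cur, count)]) s 1
      simp only [List.foldl_cons, if_neg h]
      rw [this]
      simp [dedupC, h, List.append_assoc]

theorem rle_map_fst (states : List String) :
    (run_length_encode states).map Prod.fst = dedupC states := by
  cases states with
  | nil => simp [run_length_encode, dedupC]
  | cons c rest =>
    have := rle_fold_map_fst rest [] c 1
    simpa [run_length_encode] using this

-- the range-indexed view of the pairs loop equals zipping r with its tail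
theorem range_map_getD_zip (r : List (String × Int)) :
    (List.range (r.length - 1)).map
      (fun i => (r.getD i ("", 0), r.getD (i + 1) ("", 0)))
    = r.zip r.tail := by
  apply List.ext_getElem
  · simp [List.length_zip]
  · intro i h1 h2
    have hi : i < r.length - 1 := by simpa using h1
    have hir : i < r.length := by omega
    have hit : i + 1 < r.length := by omega
    simp [List.getElem_zip, List.getElem_tail, List.getD_eq_getElem?_getD,
      hir, hit]

-- folding the change test over adjacent RLE entries yields adjP of the firsts
theorem zip_fold_adjP (r : List (String × Int)) :
    ∀ acc : List (String × String),
      (r.zip r.tail).foldl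
        (fun pairs (pq : (String × Int) × String × Int) =>
          if pq.1.1 ≠ pq.2.1 then pairs ++ [(pq.1.1, pq.2.1)] else pairs) acc
      = acc ++ adjP (r.map Prod.fst) := by
  induction r with
  | nil => intro acc; simp [adjP]
  | cons a t ih =>
    intro acc
    cases t with
    | nil => simp [adjP]
    | cons b t' =>
      simp only [List.tail_cons] at ih
      simp only [List.tail_cons, List.zip_cons_cons, List.foldl_cons]
      by_cases h : a.1 = b.1
      · rw [if_neg (by simp [h]), ih acc]
        simp [adjP, h]
      · rw [if_pos h, ih (acc ++ [(a.1, b.1)])]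
        simp [adjP, h, List.append_assoc]

theorem range_fold_adjP (r : List (String × Int)) (acc : List (String × String)) :
    (List.range (r.length - 1)).foldl
      (fun pairs i =>
        if (r.getD i ("", 0)).1 ≠ (r.getD (i + 1) ("", 0)).1 then
          pairs ++ [((r.getD i ("", 0)).1, (r.getD (i + 1) ("", 0)).1)]
        else pairs) acc
    = acc ++ adjP (r.map Prod.fst) := by
  have h1 :
      (List.range (r.length - 1)).foldl
        (fun pairs i =>
          if (r.getD i ("", 0)).1 ≠ (r.getD (i + 1) ("", 0)).1 then
            pairs ++ [((r.getD i ("", 0)).1, (r.getD (i + 1) ("", 0)).1)]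
          else pairs) acc
      = ((List.range (r.length - 1)).map
          (fun i => (r.getD i ("", 0), r.getD (i + 1) ("", 0)))).foldl
          (fun pairs (pq : (String × Int) × String × Int) =>
            if pq.1.1 ≠ pq.2.1 then pairs ++ [(pq.1.1, pq.2.1)] else pairs) acc :=
    by rw [List.foldl_map]
  rw [h1, range_map_getD_zip, zip_fold_adjP]

theorem exit_pairs_eq_adjP_dedupC (states : List String) :
    exit_pairs states = adjP (dedupC states) := by
  have hA : exit_pairs states
      = (List.range ((run_length_encode states).length - 1)).foldl
          (fun pairs i =>
            if ((run_length_encode states).getD i ("", 0)).1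
                ≠ ((run_length_encode states).getD (i + 1) ("", 0)).1 then
              pairs ++ [(((run_length_encode states).getD i ("", 0)).1,
                ((run_length_encode states).getD (i + 1) ("", 0)).1)]
            else pairs) [] := rfl
  rw [hA, range_fold_adjP, rle_map_fst]
  simp

theorem alt_go_adjP (rest : List String) :
    ∀ (prev : String) (acc : List (String × String)),
      exit_pairs_alt_go prev rest acc = acc ++ adjP (prev :: rest) := by
  induction rest with
  | nil => intro prev acc; simp [exit_pairs_alt_go, adjP]
  | cons s t ih =>
    intro prev acc
    by_cases h : s = prev
    · subst h
      simp [exit_pairs_alt_go, adjP, ih]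
    · have h' : prev ≠ s := fun e => h e.symm
      simp [exit_pairs_alt_go, h, adjP, h', ih, List.append_assoc]

theorem exit_pairs_alt_eq_adjP (states : List String) :
    exit_pairs_alt states = adjP states := by
  cases states with
  | nil => rfl
  | cons p rest => simpa using alt_go_adjP rest p []

-- ===== VERDICT (by name: the statement is the Claim_ definition above) =====
theorem exit_pairs_spec : Claim_equal_exit_pairs := by
  intro states _
  unfold Spec_exit_pairs
  rw [exit_pairs_eq_adjP_dedupC, adjP_dedupC, exit_pairs_alt_eq_adjP]
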